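-- pv_equiv track=rewrite | github.com/dorizen20/BBC | home_work4/hm4.py | fix_maze
-- ===== SOURCE A (Python) =====
-- def fix_maze(maze_rooms, maze_size:int):
--     key_positions = []
--     maze_rooms[0][0] = "empty"
--     for lines in range(maze_size):
--         for columns in range(maze_size):
--             if maze_rooms[lines][columns] == "key":
--                 key_positions.append((lines, columns))
--
--     if len(key_positions) > 1:
--         for i in range(1, len(key_positions)):
--             line, col = key_positions[i]
--             maze_rooms[line][col] = 'empty'
--
--     if len(key_positions) == 0:
--         maze_rooms[6][6] = "key"
--
--     return maze_rooms
-- ===== SOURCE B (Python) =====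
-- def fix_maze(maze_rooms, maze_size: int):
--     # Clear [0][0], then sweep in REVERSE row-major order clearing EVERY key while
--     # remembering the last key cleared (= the first key in forward order); finally
--     # write "key" back at that position, defaulting to (6, 6) when no key existed.
--     maze_rooms[0][0] = "empty"
--     keep = (6, 6)
--     for i in reversed(range(maze_size)):
--         for j in reversed(range(maze_size)):
--             if maze_rooms[i][j] == "key":
--                 maze_rooms[i][j] = "empty"
--                 keep = (i, j)
--     maze_rooms[keep[0]][keep[1]] = "key"
--     return maze_rooms
-- ===== Notes on version B (the rewrite author's own statement) =====
-- stated objective: alternative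
-- what changed: A collects all key positions into a list and then runs a second pass clearing every key after the first; B keeps no list and inverts the control flow: it sweeps the window once in REVERSE row-major order clearing EVERY key while tracking the last key cleared (= the first key in forward order, defaulting to (6,6)), and finally writes 'key' back at that single tracked position; both mutate the argument in place and leave it in the same final state.
import Mathlib
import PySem

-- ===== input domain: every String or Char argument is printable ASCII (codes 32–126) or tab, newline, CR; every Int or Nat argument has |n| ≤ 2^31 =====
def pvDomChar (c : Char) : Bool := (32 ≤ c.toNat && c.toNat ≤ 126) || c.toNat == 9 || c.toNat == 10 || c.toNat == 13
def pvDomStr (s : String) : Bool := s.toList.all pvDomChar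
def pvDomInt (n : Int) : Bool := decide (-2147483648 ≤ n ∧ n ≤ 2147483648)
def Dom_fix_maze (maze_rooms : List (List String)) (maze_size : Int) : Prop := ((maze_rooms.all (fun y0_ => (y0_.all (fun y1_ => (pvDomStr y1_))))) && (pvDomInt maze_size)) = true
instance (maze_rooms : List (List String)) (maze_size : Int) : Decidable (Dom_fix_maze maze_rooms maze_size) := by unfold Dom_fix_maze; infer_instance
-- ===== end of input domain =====

-- B replaces A's collect-then-clear (key-position list + second clearing pass) by one reverse
-- row-major sweep that clears EVERY key while tracking the last key cleared (= first forward key,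
-- default (6,6)) and writes "key" back there; both mutate the argument in place, final state equal.

-- ===== PORT A =====
-- maze[i][j] = v  (in-place double assignment; all indices here are nonnegative, Pre_ keeps them in range)
def pvSet2 (m : List (List String)) (i j : Nat) (v : String) : List (List String) :=
  m.set i ((m.getD i []).set j v)

-- maze[i][j] read with Nat indices (range indices are nonnegative; Pre_ keeps reads in range)
def pvGet2 (m : List (List String)) (i j : Nat) : String := (m.getD i []).getD j ""

def fix_maze (maze_rooms : List (List String)) (maze_size : Int) : List (List String) :=
  -- maze_rooms[0][0] = "empty"
  let m0 := pvSet2 maze_rooms 0 0 "empty"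
  -- nested for over range(maze_size)², appending key positions
  let key_positions : List (Nat × Nat) :=
    (List.range maze_size.toNat).foldl (fun acc lines =>
      (List.range maze_size.toNat).foldl (fun acc columns =>
        if pvGet2 m0 lines columns = "key" then acc ++ [(lines, columns)] else acc) acc) []
  -- for i in range(1, len(key_positions)): clear key_positions[i]
  let m1 :=
    if 1 < key_positions.length then
      (key_positions.drop 1).foldl (fun mm p => pvSet2 mm p.1 p.2 "empty") m0
    else m0
  if key_positions.length = 0 then pvSet2 m1 6 6 "key" else m1

-- ===== PORT B =====
-- the literal loop body: if maze[i][j] == "key": maze[i][j] = "empty"; keep = (i, j)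
def pvStep (st : List (List String) × Nat × Nat) (p : Nat × Nat) : List (List String) × Nat × Nat :=
  if pvGet2 st.1 p.1 p.2 = "key" then (pvSet2 st.1 p.1 p.2 "empty", p) else st

def fix_maze_alt (maze_rooms : List (List String)) (maze_size : Int) : List (List String) :=
  -- maze_rooms[0][0] = "empty"
  let m0 := pvSet2 maze_rooms 0 0 "empty"
  -- keep = (6, 6); for i in reversed(range(maze_size)): for j in reversed(range(maze_size)):
  --   if maze[i][j] == "key": maze[i][j] = "empty"; keep = (i, j)
  let st : List (List String) × Nat × Nat :=
    ((List.range maze_size.toNat).reverse).foldl (fun st i =>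
      ((List.range maze_size.toNat).reverse).foldl (fun st j => pvStep st (i, j)) st)
      (m0, (6, 6))
  -- maze_rooms[keep[0]][keep[1]] = "key"
  pvSet2 st.1 st.2.1 st.2.2 "key"

-- ===== PRECONDITION & SPEC =====
-- there is an in-window key cell other than (0, 0)
def pvHasKey (m : List (List String)) (s : Int) : Prop :=
  ∃ i : Nat, i < m.length ∧ (i : Int) < s ∧
    ∃ j : Nat, j < (m.getD i []).length ∧ (j : Int) < s ∧ ¬(i = 0 ∧ j = 0) ∧ (m.getD i []).getD j "" = "key"

-- exactly the inputs on which A returns: cell [0][0] exists, the scanned maze_size×maze_size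
-- window is inside the grid, and if that window holds no key besides (0,0) then cell [6][6] exists
def Pre_fix_maze (maze_rooms : List (List String)) (maze_size : Int) : Prop :=
  0 < maze_rooms.length ∧ 0 < (maze_rooms.getD 0 []).length ∧
  (maze_size ≤ (maze_rooms.length : Int) ∨ maze_size ≤ 0) ∧
  (∀ i : Nat, i < maze_rooms.length → (i : Int) < maze_size → maze_size ≤ ((maze_rooms.getD i []).length : Int)) ∧
  (¬ pvHasKey maze_rooms maze_size → 7 ≤ maze_rooms.length ∧ 7 ≤ (maze_rooms.getD 6 []).length)

instance (maze_rooms : List (List String)) (maze_size : Int) : Decidable (Pre_fix_maze maze_rooms maze_size) := by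
  unfold Pre_fix_maze pvHasKey; infer_instance

def pvWitness_fix_maze : List (List String) × Int := ([["a", "key"], ["b", "c"]], 2)

def Spec_fix_maze (maze_rooms : List (List String)) (maze_size : Int) (out : List (List String)) : Prop := out = fix_maze_alt maze_rooms maze_size
instance (maze_rooms : List (List String)) (maze_size : Int) (out : List (List String)) : Decidable (Spec_fix_maze maze_rooms maze_size out) := by unfold Spec_fix_maze; infer_instance

-- ===== CLAIM (what is proved, stated in full; the proofs are below) =====
def Claim_equal_fix_maze : Prop := ∀ (maze_rooms : List (List String)) (maze_size : Int), Dom_fix_maze maze_rooms maze_size → Pre_fix_maze maze_rooms maze_size → Spec_fix_maze maze_rooms maze_size (fix_maze maze_rooms maze_size)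

-- ===== LEMMAS AND PROOFS =====

theorem pv_witness_ok :
    Dom_fix_maze pvWitness_fix_maze.1 pvWitness_fix_maze.2 ∧
    Pre_fix_maze pvWitness_fix_maze.1 pvWitness_fix_maze.2 := by decide

theorem pv_getD_set_str (row : List String) (b j : Nat) (v : String) :
    (row.set b v).getD j "" = if j = b ∧ b < row.length then v else row.getD j "" := by
  by_cases h1 : j = b
  · subst h1
    by_cases h2 : j < row.length
    · simp [List.getD_eq_getElem?_getD, List.getElem?_set, h2]
    · simp [List.getD_eq_getElem?_getD, List.getElem?_set, h2,
        List.getElem?_eq_none (Nat.le_of_not_lt h2)]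
  · simp [List.getD_eq_getElem?_getD, List.getElem?_set, h1, Ne.symm h1]

theorem pv_len_set2 (m : List (List String)) (a b : Nat) (v : String) :
    (pvSet2 m a b v).length = m.length := by simp [pvSet2]

theorem pv_row_set2 (m : List (List String)) (a b : Nat) (v : String) (i : Nat) :
    (pvSet2 m a b v).getD i [] = if i = a ∧ a < m.length then (m.getD a []).set b v else m.getD i [] := by
  unfold pvSet2
  by_cases h1 : i = a
  · subst h1
    by_cases h2 : i < m.length
    · simp [List.getD_eq_getElem?_getD, List.getElem?_set, h2]
    · simp [List.getD_eq_getElem?_getD, List.getElem?_set, h2,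
        List.getElem?_eq_none (Nat.le_of_not_lt h2)]
  · simp [List.getD_eq_getElem?_getD, List.getElem?_set, h1, Ne.symm h1]

theorem pv_rowlen_set2 (m : List (List String)) (a b : Nat) (v : String) (i : Nat) :
    ((pvSet2 m a b v).getD i []).length = ((m.getD i []).length) := by
  rw [pv_row_set2]
  split_ifs with h1
  · obtain ⟨rfl, _⟩ := h1; simp
  · rfl

theorem pv_get2_set2 (m : List (List String)) (a b : Nat) (v : String) (i j : Nat) :
    pvGet2 (pvSet2 m a b v) i j =
      if i = a ∧ j = b ∧ a < m.length ∧ b < (m.getD a []).length then v else pvGet2 m i j := by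
  unfold pvGet2
  rw [pv_row_set2]
  by_cases h1 : i = a ∧ a < m.length
  · obtain ⟨rfl, hlt⟩ := h1
    rw [if_pos ⟨rfl, hlt⟩, pv_getD_set_str]
    by_cases h2 : j = b ∧ b < (m.getD i []).length
    · rw [if_pos h2, if_pos ⟨rfl, h2.1, hlt, h2.2⟩]
    · rw [if_neg h2, if_neg (by tauto)]
  · rw [if_neg h1, if_neg (by tauto)]

theorem pv_lt_of_getD_ne {α : Type} [Inhabited α] (xs : List α) (j : Nat) (d : α)
    (h : xs.getD j d ≠ d) : j < xs.length := by
  by_contra hge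
  rw [List.getD_eq_getElem?_getD, List.getElem?_eq_none (by omega)] at h
  simp at h

-- the clearing fold, pointwise
theorem pv_clearfold_len (L : List (Nat × Nat)) (mm : List (List String)) :
    (L.foldl (fun acc p => pvSet2 acc p.1 p.2 "empty") mm).length = mm.length := by
  induction L generalizing mm with
  | nil => rfl
  | cons a L ih => simp [List.foldl_cons, ih, pv_len_set2]

theorem pv_clearfold_rowlen (L : List (Nat × Nat)) (mm : List (List String)) (i : Nat) :
    ((L.foldl (fun acc p => pvSet2 acc p.1 p.2 "empty") mm).getD i []).length = (mm.getD i []).length := by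
  induction L generalizing mm with
  | nil => rfl
  | cons a L ih => rw [List.foldl_cons, ih, pv_rowlen_set2]

theorem pv_clearfold_get2 (L : List (Nat × Nat)) (mm : List (List String)) (i j : Nat)
    (hb : ∀ p ∈ L, p.1 < mm.length ∧ p.2 < (mm.getD p.1 []).length) :
    pvGet2 (L.foldl (fun acc p => pvSet2 acc p.1 p.2 "empty") mm) i j =
      if (i, j) ∈ L then "empty" else pvGet2 mm i j := by
  induction L generalizing mm with
  | nil => simp
  | cons a L ih =>
    have ha := hb a List.mem_cons_self
    have hb' : ∀ p ∈ L, p.1 < (pvSet2 mm a.1 a.2 "empty").length ∧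
        p.2 < ((pvSet2 mm a.1 a.2 "empty").getD p.1 []).length := by
      intro p hp
      have h := hb p (List.mem_cons_of_mem _ hp)
      refine ⟨?_, ?_⟩
      · rw [pv_len_set2]; exact h.1
      · rw [pv_rowlen_set2]; exact h.2
    rw [List.foldl_cons, ih _ hb']
    by_cases hmem : (i, j) ∈ L
    · rw [if_pos hmem, if_pos (List.mem_cons_of_mem _ hmem)]
    · rw [if_neg hmem, pv_get2_set2]
      by_cases hia : (i, j) = a
      · have h1 : i = a.1 := by rw [← hia]
        have h2 : j = a.2 := by rw [← hia]
        rw [if_pos ⟨h1, h2, ha.1, ha.2⟩, if_pos (by rw [hia]; exact List.mem_cons_self)]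
      · have hcond : ¬ (i = a.1 ∧ j = a.2 ∧ a.1 < mm.length ∧ a.2 < (mm.getD a.1 []).length) := by
          intro h
          exact hia (by rw [h.1, h.2.1])
        rw [if_neg hcond, if_neg (by
          intro hmm
          rcases List.mem_cons.mp hmm with h | h
          · exact hia h
          · exact hmem h)]

-- row-major position list and A's key list
def pvPosN (n : Nat) : List (Nat × Nat) :=
  (List.range n).flatMap (fun i => (List.range n).map (fun j => (i, j)))

def pvKeys (m : List (List String)) (s : Int) : List (Nat × Nat) :=
  (pvPosN s.toNat).filter (fun p => decide (pvGet2 (pvSet2 m 0 0 "empty") p.1 p.2 = "key"))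

-- A's nested collecting fold is a filter of the row-major position list
theorem pv_keys_eq (m0 : List (List String)) (n : Nat) :
    ((List.range n).foldl (fun acc lines =>
      (List.range n).foldl (fun acc columns =>
        if pvGet2 m0 lines columns = "key" then acc ++ [(lines, columns)] else acc) acc) []) =
    (pvPosN n).filter (fun p => decide (pvGet2 m0 p.1 p.2 = "key")) := by
  have hinner : ∀ (i : Nat) (acc : List (Nat × Nat)),
      (List.range n).foldl (fun acc columns =>
        if pvGet2 m0 i columns = "key" then acc ++ [(i, columns)] else acc) acc =
      acc ++ ((List.range n).filter (fun j => decide (pvGet2 m0 i j = "key"))).map (fun j => (i, j)) := by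
    intro i acc
    exact PySem.List.foldl_append_ite (fun columns => pvGet2 m0 i columns = "key") (fun columns => (i, columns)) _ _
  calc ((List.range n).foldl (fun acc lines =>
      (List.range n).foldl (fun acc columns =>
        if pvGet2 m0 lines columns = "key" then acc ++ [(lines, columns)] else acc) acc) [])
      = (List.range n).foldl (fun acc i =>
          acc ++ ((List.range n).filter (fun j => decide (pvGet2 m0 i j = "key"))).map (fun j => (i, j))) [] := by
        apply List.foldl_ext
        intro acc i _
        exact hinner i acc
    _ = (List.range n).flatMap (fun i =>
          ((List.range n).filter (fun j => decide (pvGet2 m0 i j = "key"))).map (fun j => (i, j))) := by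
        rw [PySem.List.foldl_append_eq_flatMap]; rfl
    _ = _ := by
        unfold pvPosN
        rw [List.filter_flatMap]
        apply List.flatMap_congr
        intro i _
        rw [List.filter_map]
        rfl

theorem pv_mem_posN (n : Nat) (p : Nat × Nat) : p ∈ pvPosN n ↔ p.1 < n ∧ p.2 < n := by
  rcases p with ⟨i, j⟩
  simp [pvPosN, List.mem_flatMap]

theorem pv_nodup_posN (n : Nat) : (pvPosN n).Nodup := by
  unfold pvPosN
  rw [List.nodup_flatMap]
  constructor
  · intro i _
    exact (List.nodup_range).map (fun a b h => congrArg Prod.snd h)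
  · apply List.Pairwise.imp ?_ (List.pairwise_lt_range (n := n))
    intro a b hab
    intro x hxa hxb
    simp only [List.mem_map] at hxa hxb
    rcases hxa with ⟨j1, _, rfl⟩
    rcases hxb with ⟨j2, _, h⟩
    have : b = a := congrArg Prod.fst h
    omega

theorem pv_keys_mem_iff (m : List (List String)) (s : Int)
    (h0 : 0 < m.length) (h00 : 0 < (m.getD 0 []).length) (p : Nat × Nat) :
    p ∈ pvKeys m s ↔
      p.1 < s.toNat ∧ p.2 < s.toNat ∧ ¬(p.1 = 0 ∧ p.2 = 0) ∧ (m.getD p.1 []).getD p.2 "" = "key" := by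
  unfold pvKeys
  rw [List.mem_filter]
  constructor
  · rintro ⟨hmem, hkey⟩
    have hpos := (pv_mem_posN s.toNat p).mp hmem
    have hkey' : pvGet2 (pvSet2 m 0 0 "empty") p.1 p.2 = "key" := by simpa using hkey
    by_cases hp : p.1 = 0 ∧ p.2 = 0
    · exfalso
      rw [hp.1, hp.2, pv_get2_set2, if_pos ⟨rfl, rfl, h0, h00⟩] at hkey'
      exact absurd hkey' (by decide)
    · rw [pv_get2_set2, if_neg (by tauto)] at hkey'
      exact ⟨hpos.1, hpos.2, hp, hkey'⟩
  · rintro ⟨h1, h2, h3, h4⟩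
    refine ⟨(pv_mem_posN s.toNat p).mpr ⟨h1, h2⟩, ?_⟩
    rw [pv_get2_set2, if_neg (by tauto)]
    simpa using h4

theorem pv_keys_nodup (m : List (List String)) (s : Int) : (pvKeys m s).Nodup :=
  List.Nodup.filter _ (pv_nodup_posN _)

-- fold over a flatMap is the nested fold
theorem pv_foldl_flatMap {α β γ : Type} (l : List α) (f : α → List β) (g : γ → β → γ) (init : γ) :
    (l.flatMap f).foldl g init = l.foldl (fun s a => (f a).foldl g s) init := by
  induction l generalizing init with
  | nil => rfl
  | cons a l ih => rw [List.flatMap_cons, List.foldl_append, List.foldl_cons, ih]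

-- B's nested reversed loops, flattened to one fold over the reversed row-major list
theorem pv_alt_fold (m0 : List (List String)) (n : Nat) :
    ((List.range n).reverse).foldl (fun st i =>
      ((List.range n).reverse).foldl (fun st j => pvStep st (i, j)) st) (m0, ((6:Nat), (6:Nat))) =
    ((pvPosN n).reverse).foldl pvStep (m0, (6, 6)) := by
  have h : (pvPosN n).reverse =
      ((List.range n).reverse).flatMap (fun i => ((List.range n).reverse).map (fun j => (i, j))) := by
    unfold pvPosN
    rw [List.reverse_flatMap]
    apply List.flatMap_congr
    intro i _
    rw [List.map_reverse]
    rfl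
  rw [h, pv_foldl_flatMap]
  apply List.foldl_ext
  intro st i _
  rw [List.foldl_map]

theorem pv_getLast?_cons_getD {α : Type} (a : α) (xs : List α) (k : α) :
    ((a :: xs).getLast?).getD k = (xs.getLast?).getD a := by
  cases xs with
  | nil => rfl
  | cons b xs =>
    rw [List.getLast?_cons_cons]
    cases hx : (b :: xs).getLast? with
    | none => exact absurd (List.getLast?_eq_none_iff.mp hx) (by simp)
    | some v => rfl

-- the single sweep factored: grid = clear every key of mm (in list order), keep = last key or k
theorem pv_fold_factor (L : List (Nat × Nat)) (mm : List (List String)) (k : Nat × Nat)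
    (hnd : L.Nodup) :
    L.foldl pvStep (mm, k) =
      ((L.filter (fun p => decide (pvGet2 mm p.1 p.2 = "key"))).foldl
          (fun g p => pvSet2 g p.1 p.2 "empty") mm,
       ((L.filter (fun p => decide (pvGet2 mm p.1 p.2 = "key"))).getLast?).getD k) := by
  induction L generalizing mm k with
  | nil => rfl
  | cons a L ih =>
    have hnd' := (List.nodup_cons.mp hnd)
    have hstable : ∀ p ∈ L,
        (decide (pvGet2 (pvSet2 mm a.1 a.2 "empty") p.1 p.2 = "key")) =
        (decide (pvGet2 mm p.1 p.2 = "key")) := by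
      intro p hp
      have hpa : p ≠ a := fun h => hnd'.1 (h ▸ hp)
      have hc : ¬ (p.1 = a.1 ∧ p.2 = a.2 ∧ a.1 < mm.length ∧ a.2 < (mm.getD a.1 []).length) := by
        rintro ⟨h1, h2, -, -⟩
        exact hpa (Prod.ext h1 h2)
      rw [pv_get2_set2, if_neg hc]
    by_cases hk : pvGet2 mm a.1 a.2 = "key"
    · rw [List.foldl_cons]
      have hstep : pvStep (mm, k) a = (pvSet2 mm a.1 a.2 "empty", a) := by
        simp [pvStep, hk]
      rw [hstep, ih _ _ hnd'.2]
      rw [List.filter_congr hstable]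
      rw [List.filter_cons_of_pos (by simp [hk])]
      rw [List.foldl_cons, pv_getLast?_cons_getD]
    · rw [List.foldl_cons]
      have hstep : pvStep (mm, k) a = (mm, k) := by simp [pvStep, hk]
      rw [hstep, ih _ _ hnd'.2]
      rw [List.filter_cons_of_neg (by simp [hk])]

-- two grids are equal when they agree in shape and on every getD-read cell
theorem pv_eq_of_getD (xs ys : List (List String))
    (hlen : xs.length = ys.length)
    (hrowlen : ∀ i, i < xs.length → (xs.getD i []).length = (ys.getD i []).length)
    (hcell : ∀ i j, i < xs.length → j < (xs.getD i []).length →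
      (xs.getD i []).getD j "" = (ys.getD i []).getD j "") : xs = ys := by
  apply List.ext_getElem hlen
  intro i hi1 hi2
  have hrow1 : xs.getD i [] = xs[i] := by
    rw [List.getD_eq_getElem?_getD, List.getElem?_eq_getElem hi1]; rfl
  have hrow2 : ys.getD i [] = ys[i] := by
    rw [List.getD_eq_getElem?_getD, List.getElem?_eq_getElem hi2]; rfl
  apply List.ext_getElem
  · rw [← hrow1, ← hrow2]; exact hrowlen i hi1
  intro j hj1 hj2
  have hc := hcell i j hi1 (by rw [hrow1]; exact hj1)
  rw [hrow1, hrow2] at hc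
  rw [List.getD_eq_getElem?_getD, List.getElem?_eq_getElem hj1] at hc
  rw [List.getD_eq_getElem?_getD, List.getElem?_eq_getElem hj2] at hc
  exact hc

-- B in factored form: clear-all over the reversed key list, then write "key" at the first key
theorem pv_alt_eq (m : List (List String)) (s : Int) :
    fix_maze_alt m s =
      pvSet2 (((pvKeys m s).reverse).foldl (fun g p => pvSet2 g p.1 p.2 "empty") (pvSet2 m 0 0 "empty"))
        (((pvKeys m s).head?).getD (6, 6)).1 (((pvKeys m s).head?).getD (6, 6)).2 "key" := by
  simp only [fix_maze_alt]
  rw [pv_alt_fold, pv_fold_factor _ _ _ (List.nodup_reverse.mpr (pv_nodup_posN s.toNat))]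
  have hf : ((pvPosN s.toNat).reverse).filter
      (fun p => decide (pvGet2 (pvSet2 m 0 0 "empty") p.1 p.2 = "key")) = (pvKeys m s).reverse := by
    rw [List.filter_reverse]; rfl
  rw [hf, List.getLast?_reverse]

-- ===== MAIN PROOF =====

theorem pv_main (m : List (List String)) (s : Int) (hpre : Pre_fix_maze m s) :
    fix_maze m s = fix_maze_alt m s := by
  obtain ⟨h0, h00, hsz, hrow, h66⟩ := hpre
  have hn : s.toNat ≤ m.length := by rcases hsz with h | h <;> omega
  have hkb : ∀ p ∈ pvKeys m s, p.1 < m.length ∧ p.2 < (m.getD p.1 []).length := by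
    intro p hp
    obtain ⟨hp1, hp2, hp3, hp4⟩ := (pv_keys_mem_iff m s h0 h00 p).mp hp
    exact ⟨lt_of_lt_of_le hp1 hn, pv_lt_of_getD_ne _ _ _ (by rw [hp4]; decide)⟩
  rw [pv_alt_eq]
  simp only [fix_maze]
  rw [pv_keys_eq]
  have hfold : (pvPosN s.toNat).filter
      (fun p => decide (pvGet2 (pvSet2 m 0 0 "empty") p.1 p.2 = "key")) = pvKeys m s := rfl
  rw [hfold]
  cases hK : pvKeys m s with
  | nil => simp
  | cons f T =>
    simp only [List.length_cons, List.head?_cons, Option.getD_some, List.drop_succ_cons,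
      List.drop_zero]
    rw [if_neg (by omega : ¬ T.length + 1 = 0)]
    have hTsub : ∀ p ∈ T, p ∈ pvKeys m s := by
      rw [hK]; exact fun p hp => List.mem_cons_of_mem _ hp
    have hfK : f ∈ pvKeys m s := by rw [hK]; exact List.mem_cons_self
    have hfT : f ∉ T := by
      have hnd := pv_keys_nodup m s
      rw [hK] at hnd
      exact (List.nodup_cons.mp hnd).1
    have hA : (if 1 < T.length + 1 then
        T.foldl (fun mm p => pvSet2 mm p.1 p.2 "empty") (pvSet2 m 0 0 "empty")
      else pvSet2 m 0 0 "empty") =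
        T.foldl (fun mm p => pvSet2 mm p.1 p.2 "empty") (pvSet2 m 0 0 "empty") := by
      cases T with
      | nil => simp
      | cons a T' => rw [if_pos (by simp)]
    rw [hA]
    have hb0 : ∀ p ∈ pvKeys m s, p.1 < (pvSet2 m 0 0 "empty").length ∧
        p.2 < ((pvSet2 m 0 0 "empty").getD p.1 []).length := by
      intro p hp
      have h := hkb p hp
      rw [pv_len_set2, pv_rowlen_set2]
      exact h
    have hbT : ∀ p ∈ T, p.1 < (pvSet2 m 0 0 "empty").length ∧
        p.2 < ((pvSet2 m 0 0 "empty").getD p.1 []).length :=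
      fun p hp => hb0 p (hTsub p hp)
    have hbK : ∀ p ∈ ((f :: T).reverse : List (Nat × Nat)),
        p.1 < (pvSet2 m 0 0 "empty").length ∧
        p.2 < ((pvSet2 m 0 0 "empty").getD p.1 []).length := by
      intro p hp
      exact hb0 p (by rw [hK]; exact List.mem_reverse.mp hp)
    have hfm : pvGet2 (pvSet2 m 0 0 "empty") f.1 f.2 = "key" := by
      obtain ⟨-, -, hne, hcell⟩ := (pv_keys_mem_iff m s h0 h00 f).mp hfK
      rw [pv_get2_set2, if_neg (by tauto)]
      exact hcell
    apply pv_eq_of_getD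
    · simp only [pv_clearfold_len, pv_len_set2]
    · intro i hi
      simp only [pv_clearfold_rowlen, pv_rowlen_set2]
    · intro i j hi' hj'
      have hi : i < m.length := by
        rw [pv_clearfold_len, pv_len_set2] at hi'; exact hi'
      have hj : j < ((pvSet2 m 0 0 "empty").getD i []).length := by
        rw [pv_clearfold_rowlen] at hj'; exact hj'
      show pvGet2 _ i j = pvGet2 _ i j
      rw [pv_clearfold_get2 T _ i j hbT,
          pv_get2_set2 ((f :: T).reverse.foldl (fun g p => pvSet2 g p.1 p.2 "empty")
            (pvSet2 m 0 0 "empty")) f.1 f.2 "key" i j,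
          pv_clearfold_get2 ((f :: T).reverse) _ i j hbK]
      by_cases hif : (i, j) = f
      · have h1 : i = f.1 := congrArg Prod.fst hif
        have h2 : j = f.2 := congrArg Prod.snd hif
        have hc1 : f.1 < ((f :: T).reverse.foldl (fun g p => pvSet2 g p.1 p.2 "empty")
            (pvSet2 m 0 0 "empty")).length := by
          rw [pv_clearfold_len, pv_len_set2]; exact (hkb f hfK).1
        have hc2 : f.2 < (((f :: T).reverse.foldl (fun g p => pvSet2 g p.1 p.2 "empty")
            (pvSet2 m 0 0 "empty")).getD f.1 []).length := by
          rw [pv_clearfold_rowlen, pv_rowlen_set2]; exact (hkb f hfK).2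
        rw [if_pos (⟨h1, h2, hc1, hc2⟩ :
              i = f.1 ∧ j = f.2 ∧ _ ∧ _),
            if_neg (show ((i, j) : Nat × Nat) ∉ T from fun hm => hfT (hif ▸ hm)),
            h1, h2, hfm]
      · rw [if_neg (show ¬ (i = f.1 ∧ j = f.2 ∧
            f.1 < ((f :: T).reverse.foldl (fun g p => pvSet2 g p.1 p.2 "empty")
              (pvSet2 m 0 0 "empty")).length ∧
            f.2 < (((f :: T).reverse.foldl (fun g p => pvSet2 g p.1 p.2 "empty")
              (pvSet2 m 0 0 "empty")).getD f.1 []).length)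
          from fun h => hif (Prod.ext h.1 h.2.1))]
        by_cases hmem : (i, j) ∈ T
        · rw [if_pos hmem, if_pos (List.mem_reverse.mpr (List.mem_cons_of_mem _ hmem))]
        · rw [if_neg hmem, if_neg (fun hm =>
            (List.mem_cons.mp (List.mem_reverse.mp hm)).elim hif hmem)]

-- ===== VERDICT (by name: the statement is the Claim_ definition above) =====
theorem fix_maze_spec : Claim_equal_fix_maze := by
  intro m s _ hpre
  unfold Spec_fix_maze
  exact pv_main m s hpre
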